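-- pv_equiv track=rewrite | github.com/mchang21/Advent_Of_Code | 2021/Day_10/10.py | get_incomplete
-- ===== SOURCE A (Python) =====
-- def get_incomplete(data):
--     closed = {'}':'{', ']':'[', ')':'(', '>':'<'}
--     corrupted = set()
--     for i,s in enumerate(data):
--         stack = []
--         for c in s:
--             if c in closed:
--                 # found incorrect closing character
--                 if stack and stack[-1] == closed[c]:
--                     stack.pop()
--                 else:
--                     corrupted.add(i)
--                     break
--             # append open character
--             else:
--                 stack.append(c)
--     incomplete = []
--     for i, s in enumerate(data):
--         if i in corrupted: continue
--         incomplete.append(s)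
--     return incomplete
-- ===== SOURCE B (Python) =====
-- # B: instead of a stack parse, repeatedly cancel adjacent matched bracket pairs
-- # until a fixpoint; a line is kept iff its reduced normal form contains no closer.
-- _OPEN = {'(': ')', '[': ']', '{': '}', '<': '>'}
-- _CLOSERS = ')]}>'
--
-- def _cancel_pass(t):
--     out = []
--     i = 0
--     while i < len(t):
--         if i + 1 < len(t) and _OPEN.get(t[i]) == t[i + 1]:
--             i += 2
--         else:
--             out.append(t[i])
--             i += 1
--     return out
--
-- def _normal_form(s):
--     t = list(s)
--     while True:
--         u = _cancel_pass(t)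
--         if len(u) == len(t):
--             return t
--         t = u
--
-- def get_incomplete(data):
--     return [s for s in data if all(c not in _CLOSERS for c in _normal_form(s))]
-- ===== Notes on version B (the rewrite author's own statement) =====
-- stated objective: alternative
-- what changed: A runs a left-to-right stack parse per line, collects corrupted line indices in a set and filters data in a second pass; B uses a rewriting approach: it repeatedly deletes adjacent matched bracket pairs until a fixpoint and keeps a line iff the resulting normal form contains no closing bracket (the rewrite system is confluent and the stack parse computes its normal form, so the tests agree).
import Mathlib
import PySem

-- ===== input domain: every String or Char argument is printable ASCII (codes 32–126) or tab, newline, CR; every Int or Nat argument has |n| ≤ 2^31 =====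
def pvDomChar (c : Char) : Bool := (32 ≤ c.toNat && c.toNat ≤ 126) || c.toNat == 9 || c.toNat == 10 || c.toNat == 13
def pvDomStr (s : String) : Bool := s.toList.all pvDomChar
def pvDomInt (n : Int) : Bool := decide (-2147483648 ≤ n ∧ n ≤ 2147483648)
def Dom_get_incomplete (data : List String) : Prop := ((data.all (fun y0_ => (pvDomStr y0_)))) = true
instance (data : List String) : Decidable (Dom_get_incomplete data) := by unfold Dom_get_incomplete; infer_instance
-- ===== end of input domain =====

-- B replaces A's per-line stack parse + corrupted-index set + second filtering pass with a
-- rewriting algorithm: repeatedly cancel adjacent matched bracket pairs to a fixpoint and keep a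
-- line iff the normal form contains no closing bracket (objective: alternative algorithm).

-- ===== PORT A =====
-- closed = {'}':'{', ']':'[', ')':'(', '>':'<'}
def pvClosedA : PySem.Dict Char Char :=
  PySem.Dict.ofList [('}','{'), (']','['), (')','('), ('>','<')]

-- inner 'for c in s' loop of A: returns true iff the line is corrupted (the 'break' branch fires).
-- stack head = Python stack[-1] (push = cons, pop = tail).
def pvCorruptA : List Char → List Char → Bool
  | _, [] => false
  | stack, c :: cs =>
    match pvClosedA.get? c with          -- 'c in closed' and 'closed[c]' together
    | some o =>
      match stack with
      | t :: rest => if t = o then pvCorruptA rest cs else true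
      | [] => true
    | none => pvCorruptA (c :: stack) cs

def get_incomplete (data : List String) : List String :=
  let corrupted : PySem.Set Int :=
    (PySem.List.enumerate data 0).foldl
      (fun (s : PySem.Set Int) p => if pvCorruptA [] p.2.toList then PySem.Set.add s p.1 else s)
      PySem.Set.empty
  (PySem.List.enumerate data 0).foldl
    (fun acc p => if PySem.Set.contains corrupted p.1 then acc else acc ++ [p.2]) []

-- ===== PORT B =====
-- _OPEN = {'(':')', '[':']', '{':'}', '<':'>'}
def pvOpenB : PySem.Dict Char Char :=
  PySem.Dict.ofList [('(',')'), ('[',']'), ('{','}'), ('<','>')]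

-- "c in ')]}>'" ported as the four-way disjunction (exact on chars).
def pvIsCloser (c : Char) : Bool := c == ')' || c == ']' || c == '}' || c == '>'

-- _cancel_pass: one left-to-right pass, deleting each adjacent matched pair it meets.
def pvCancelPass : List Char → List Char
  | [] => []
  | [c] => [c]
  | c :: d :: rest =>
    if pvOpenB.get? c = some d then pvCancelPass rest
    else c :: pvCancelPass (d :: rest)

-- a pass never lengthens its input (needed by pvNormal's termination; cited in decreasing_by)
lemma pvCancelPass_length (t : List Char) : (pvCancelPass t).length ≤ t.length := by
  induction t using pvCancelPass.induct with
  | case1 => simp [pvCancelPass]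
  | case2 c => simp [pvCancelPass]
  | case3 c d rest h ih => simp [pvCancelPass, h]; omega
  | case4 c d rest h ih => simp only [pvCancelPass, if_neg h, List.length_cons]; simp at ih ⊢; omega

-- _normal_form: iterate _cancel_pass until the length stops shrinking.
def pvNormal (t : List Char) : List Char :=
  if (pvCancelPass t).length = t.length then t else pvNormal (pvCancelPass t)
termination_by t.length
decreasing_by
  have := pvCancelPass_length t
  omega

def get_incomplete_alt (data : List String) : List String :=
  data.filter (fun s => (pvNormal s.toList).all (fun c => !pvIsCloser c))

-- ===== PRECONDITION & SPEC =====
def Spec_get_incomplete (data : List String) (out : List String) : Prop := out = get_incomplete_alt data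
instance (data : List String) (out : List String) : Decidable (Spec_get_incomplete data out) := by unfold Spec_get_incomplete; infer_instance

-- ===== CLAIM (what is proved, stated in full; the proofs are below) =====
def Claim_equal_get_incomplete : Prop := ∀ (data : List String), Dom_get_incomplete data → Spec_get_incomplete data (get_incomplete data)

-- ===== LEMMAS AND PROOFS =====

-- explicit tables for the two literal dicts
lemma pvGetA (c : Char) : pvClosedA.get? c =
    if c = '}' then some '{' else if c = ']' then some '[' else
    if c = ')' then some '(' else if c = '>' then some '<' else none := by
  have h : pvClosedA = PySem.Dict.mk [('}','{'), (']','['), (')','('), ('>','<')] := by decide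
  rw [h]
  by_cases h1 : c = '}'
  · subst h1; decide
  by_cases h2 : c = ']'
  · subst h2; decide
  by_cases h3 : c = ')'
  · subst h3; decide
  by_cases h4 : c = '>'
  · subst h4; decide
  have e1 : (('}' : Char) == c) = false := beq_eq_false_iff_ne.mpr (fun e => h1 e.symm)
  have e2 : ((']' : Char) == c) = false := beq_eq_false_iff_ne.mpr (fun e => h2 e.symm)
  have e3 : ((')' : Char) == c) = false := beq_eq_false_iff_ne.mpr (fun e => h3 e.symm)
  have e4 : (('>' : Char) == c) = false := beq_eq_false_iff_ne.mpr (fun e => h4 e.symm)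
  simp only [PySem.Dict.get?_mk_cons, e1, e2, e3, e4, if_false, Bool.false_eq_true]
  simp [PySem.Dict.get?, h1, h2, h3, h4]

lemma pvGetB (t : Char) : pvOpenB.get? t =
    if t = '(' then some ')' else if t = '[' then some ']' else
    if t = '{' then some '}' else if t = '<' then some '>' else none := by
  have h : pvOpenB = PySem.Dict.mk [('(',')'), ('[',']'), ('{','}'), ('<','>')] := by decide
  rw [h]
  by_cases h1 : t = '('
  · subst h1; decide
  by_cases h2 : t = '['
  · subst h2; decide
  by_cases h3 : t = '{'
  · subst h3; decide
  by_cases h4 : t = '<'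
  · subst h4; decide
  have e1 : (('(' : Char) == t) = false := beq_eq_false_iff_ne.mpr (fun e => h1 e.symm)
  have e2 : (('[' : Char) == t) = false := beq_eq_false_iff_ne.mpr (fun e => h2 e.symm)
  have e3 : (('{' : Char) == t) = false := beq_eq_false_iff_ne.mpr (fun e => h3 e.symm)
  have e4 : (('<' : Char) == t) = false := beq_eq_false_iff_ne.mpr (fun e => h4 e.symm)
  simp only [PySem.Dict.get?_mk_cons, e1, e2, e3, e4, if_false, Bool.false_eq_true]
  simp [PySem.Dict.get?, h1, h2, h3, h4]

-- the two literal dicts are inverse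
lemma pvInv (c o : Char) : pvClosedA.get? c = some o ↔ pvOpenB.get? o = some c := by
  rw [pvGetA, pvGetB]
  constructor
  · intro h; split_ifs at h with h1 h2 h3 h4 <;> (subst_eqs; decide)
  · intro h; split_ifs at h with h1 h2 h3 h4 <;> (subst_eqs; decide)

-- image facts
lemma pvAcl (c o : Char) (h : pvClosedA.get? c = some o) :
    pvIsCloser c = true ∧ pvIsCloser o = false := by
  rw [pvGetA] at h; split_ifs at h with h1 h2 h3 h4 <;> (subst_eqs; decide)

lemma pvBcl (o c : Char) (h : pvOpenB.get? o = some c) :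
    pvIsCloser c = true ∧ pvIsCloser o = false := by
  rw [pvGetB] at h; split_ifs at h with h1 h2 h3 h4 <;> (subst_eqs; decide)

lemma pvCloserSome (c : Char) (h : pvIsCloser c = true) : (pvClosedA.get? c).isSome = true := by
  by_cases h1 : c = ')'
  · subst h1; decide
  by_cases h2 : c = ']'
  · subst h2; decide
  by_cases h3 : c = '}'
  · subst h3; decide
  by_cases h4 : c = '>'
  · subst h4; decide
  exfalso; simp [pvIsCloser, h1, h2, h3, h4] at h

-- proof-side device: the normal form of st.reverse ++ cs under pair cancellation,
-- computed by a stack run that also pushes unmatched closers.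
def pvNF : List Char → List Char → List Char
  | st, [] => st.reverse
  | st, c :: cs =>
    match st with
    | t :: rest => if pvOpenB.get? t = some c then pvNF rest cs else pvNF (c :: t :: rest) cs
    | [] => pvNF [c] cs

-- a closer on the stack stays in the normal form
lemma pvNF_persist (cs : List Char) : ∀ st : List Char, st.any pvIsCloser = true →
    (pvNF st cs).any pvIsCloser = true := by
  induction cs with
  | nil => intro st h; simpa [pvNF] using h
  | cons c cs ih =>
    intro st h
    cases st with
    | nil => simp at h
    | cons t rest =>
      by_cases hp : pvOpenB.get? t = some c
      · have ht := (pvBcl t c hp).2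
        simp only [List.any_cons, ht, Bool.false_or] at h
        simpa [pvNF, hp] using ih rest h
      · have : ((c :: t :: rest).any pvIsCloser) = true := by
          simp only [List.any_cons] at h ⊢; simp [h]
        simpa [pvNF, hp] using ih (c :: t :: rest) this

-- A's corruption test = "the normal form contains a closer"
lemma pvNF_corrupt (cs : List Char) : ∀ st : List Char, st.any pvIsCloser = false →
    pvCorruptA st cs = (pvNF st cs).any pvIsCloser := by
  induction cs with
  | nil => intro st h; simpa [pvCorruptA, pvNF] using h.symm
  | cons c cs ih =>
    intro st h
    cases hc : pvClosedA.get? c with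
    | some o =>
      have hccl := (pvAcl c o hc).1
      cases st with
      | nil =>
        have : (pvNF [] (c :: cs)).any pvIsCloser = true := by
          show (pvNF [c] cs).any pvIsCloser = true
          exact pvNF_persist cs [c] (by simp [hccl])
        simp [pvCorruptA, hc, this]
      | cons t rest =>
        by_cases ht : t = o
        · subst ht
          have hb : pvOpenB.get? t = some c := (pvInv c t).mp hc
          have hrest : rest.any pvIsCloser = false := by
            simp only [List.any_cons] at h; simp_all
          simp [pvCorruptA, hc, pvNF, hb, ih rest hrest]
        · have hb : ¬ pvOpenB.get? t = some c := by
            intro hb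
            have h2 : pvClosedA.get? c = some t := (pvInv c t).mpr hb
            rw [hc] at h2
            exact ht (Option.some.inj h2).symm
          have hstep : pvNF (t :: rest) (c :: cs) = pvNF (c :: t :: rest) cs := by
            simp [pvNF, hb]
          have : (pvNF (t :: rest) (c :: cs)).any pvIsCloser = true := by
            rw [hstep]
            exact pvNF_persist cs _ (by simp [hccl])
          simp [pvCorruptA, hc, ht, this]
    | none =>
      have hccl : pvIsCloser c = false := by
        rw [← Bool.not_eq_true]; intro hcl
        have := pvCloserSome c hcl; rw [hc] at this; simp at this
      have h' : ((c :: st).any pvIsCloser) = false := by simp [hccl, h]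
      cases st with
      | nil => simpa [pvCorruptA, hc, pvNF] using ih [c] h'
      | cons t rest =>
        have hb : ¬ pvOpenB.get? t = some c := by
          intro hb; have := (pvBcl t c hb).1; simp [hccl] at this
        simpa [pvCorruptA, hc, pvNF, hb] using ih (c :: t :: rest) h'

-- one cancellation pass does not change the normal form
lemma pvNF_pass (t : List Char) : ∀ st : List Char, pvNF st (pvCancelPass t) = pvNF st t := by
  induction t using pvCancelPass.induct with
  | case1 => intro st; simp [pvCancelPass]
  | case2 c => intro st; simp [pvCancelPass]
  | case3 c d rest h ih =>
    intro st
    have hd : pvIsCloser d = true := (pvBcl c d h).1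
    have push : pvNF st (c :: d :: rest) = pvNF (c :: st) (d :: rest) := by
      cases st with
      | nil => simp [pvNF]
      | cons u r =>
        have : ¬ pvOpenB.get? u = some c := by
          intro hb; have := (pvBcl u c hb).1; have hc := (pvBcl c d h).2; simp [hc] at this
        simp [pvNF, this]
    have pop : pvNF (c :: st) (d :: rest) = pvNF st rest := by simp [pvNF, h]
    rw [pvCancelPass, if_pos h, ih st, push, pop]
  | case4 c d rest h ih =>
    intro st
    rw [pvCancelPass, if_neg h]
    cases st with
    | nil =>
      show pvNF [c] (pvCancelPass (d :: rest)) = pvNF [] (c :: d :: rest)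
      simp [pvNF, ih]
    | cons u r =>
      by_cases hp : pvOpenB.get? u = some c
      · simp [pvNF, hp, ih]
      · simp [pvNF, hp, ih]

-- iterating passes to the fixpoint does not change the normal form
lemma pvNF_normal (t : List Char) : pvNF [] (pvNormal t) = pvNF [] t := by
  induction t using pvNormal.induct with
  | case1 t h => rw [pvNormal, if_pos h]
  | case2 t h ih => rw [pvNormal, if_neg h, ih, pvNF_pass]

-- a pass of unchanged length found no adjacent matched pair
lemma pvFix_chain (t : List Char) (h : (pvCancelPass t).length = t.length) :
    t.IsChain (fun x y => ¬ pvOpenB.get? x = some y) := by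
  induction t using pvCancelPass.induct with
  | case1 => exact List.isChain_nil
  | case2 c => exact List.isChain_singleton c
  | case3 c d rest hm ih =>
    exfalso
    have := pvCancelPass_length rest
    rw [pvCancelPass, if_pos hm] at h
    simp at h; omega
  | case4 c d rest hm ih =>
    rw [pvCancelPass, if_neg hm] at h
    simp only [List.length_cons, Nat.add_right_cancel_iff] at h
    exact List.isChain_cons.mpr ⟨by intro y hy; cases (List.head?_cons ▸ hy : some d = some y); exact hm, ih h⟩

-- on an irreducible string the stack run is the identity
lemma pvNF_irred (t : List Char) : ∀ st : List Char,
    t.IsChain (fun x y => ¬ pvOpenB.get? x = some y) →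
    (∀ c h, t.head? = some c → st.head? = some h → ¬ pvOpenB.get? h = some c) →
    pvNF st t = st.reverse ++ t := by
  induction t with
  | nil => intro st _ _; simp [pvNF]
  | cons c cs ih =>
    intro st hch hhd
    have hch' : cs.IsChain (fun x y => ¬ pvOpenB.get? x = some y) := by
      simpa using hch.tail
    have hrel : ∀ d, cs.head? = some d → ¬ pvOpenB.get? c = some d := by
      intro d hd
      exact (List.isChain_cons.mp hch).1 d hd
    cases st with
    | nil =>
      have hstep : pvNF ([] : List Char) (c :: cs) = pvNF [c] cs := by simp [pvNF]
      rw [hstep, ih [c] hch' (by intro d hh hd hs; simp at hs; subst hs; exact hrel d hd)]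
      simp
    | cons u r =>
      have hnp : ¬ pvOpenB.get? u = some c := hhd c u (by simp) (by simp)
      have hstep : pvNF (u :: r) (c :: cs) = pvNF (c :: u :: r) cs := by simp [pvNF, hnp]
      rw [hstep, ih (c :: u :: r) hch' (by intro d hh hd hs; simp at hs; subst hs; exact hrel d hd)]
      simp

-- the fixpoint is irreducible
lemma pvNormal_fix (t : List Char) : (pvCancelPass (pvNormal t)).length = (pvNormal t).length := by
  induction t using pvNormal.induct with
  | case1 t h => rw [pvNormal, if_pos h]; exact h
  | case2 t h ih => rw [pvNormal, if_neg h]; exact ih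

lemma pvNF_of_normal (t : List Char) : pvNF [] (pvNormal t) = pvNormal t := by
  have := pvFix_chain (pvNormal t) (pvNormal_fix t)
  have h := pvNF_irred (pvNormal t) [] this (by intro c h _ hs; simp at hs)
  simpa using h

-- per-line equivalence: A's corruption test is the negation of B's keep test
lemma pvLine (s : List Char) :
    pvCorruptA [] s = !((pvNormal s).all (fun c => !pvIsCloser c)) := by
  have h1 : pvCorruptA [] s = (pvNF [] s).any pvIsCloser := pvNF_corrupt s [] (by simp)
  have h2 : (pvNF [] s).any pvIsCloser = (pvNormal s).any pvIsCloser := by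
    rw [← pvNF_normal, pvNF_of_normal]
  rw [h1, h2]
  induction pvNormal s with
  | nil => simp
  | cons c cs ih => simp [List.any_cons, List.all_cons, ih]

-- membership in the corrupted set built by A's first loop
lemma pvMemBuild (l : List String) : ∀ (k : Int) (S : PySem.Set Int) (j : Int),
    (j ∈ (PySem.List.enumerate l k).foldl
        (fun (s : PySem.Set Int) p => if pvCorruptA [] p.2.toList then PySem.Set.add s p.1 else s) S)
    ↔ j ∈ S ∨ ∃ m : Nat, m < l.length ∧ j = k + m ∧ pvCorruptA [] ((l.getD m "").toList) = true := by
  induction l with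
  | nil => intro k S j; simp [PySem.List.enumerate_nil]
  | cons s l ih =>
    intro k S j
    rw [PySem.List.enumerate_cons, List.foldl_cons, ih]
    by_cases hp : pvCorruptA [] s.toList = true
    · rw [if_pos hp, PySem.Set.mem_add]
      constructor
      · rintro (⟨hj | rfl⟩ | ⟨m, hm, rfl, hP⟩)
        · exact Or.inl hj
        · exact Or.inr ⟨0, by simp, by simp, by simpa using hp⟩
        · exact Or.inr ⟨m + 1, by simp; omega, by push_cast; ring, by simpa using hP⟩
      · rintro (hj | ⟨m, hm, rfl, hP⟩)
        · exact Or.inl (Or.inl hj)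
        · cases m with
          | zero => exact Or.inl (Or.inr (by simp))
          | succ m =>
            exact Or.inr ⟨m, by simp at hm; omega, by push_cast; ring, by simpa using hP⟩
    · rw [if_neg hp]
      constructor
      · rintro (hj | ⟨m, hm, rfl, hP⟩)
        · exact Or.inl hj
        · exact Or.inr ⟨m + 1, by simp; omega, by push_cast; ring, by simpa using hP⟩
      · rintro (hj | ⟨m, hm, rfl, hP⟩)
        · exact Or.inl hj
        · cases m with
          | zero => exact absurd (by simpa using hP) hp
          | succ m =>
            exact Or.inr ⟨m, by simp at hm; omega, by push_cast; ring, by simpa using hP⟩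

-- A's second loop equals B's filter, given the index characterisation of the set
lemma pvPass2 (S : PySem.Set Int) (l : List String) : ∀ (k : Int) (acc : List String),
    (∀ m : Nat, m < l.length → ((k + m ∈ S) ↔ pvCorruptA [] ((l.getD m "").toList) = true)) →
    (PySem.List.enumerate l k).foldl
        (fun acc p => if PySem.Set.contains S p.1 then acc else acc ++ [p.2]) acc
      = acc ++ l.filter (fun s => (pvNormal s.toList).all (fun c => !pvIsCloser c)) := by
  induction l with
  | nil => intro k acc _; simp [PySem.List.enumerate_nil]
  | cons s l ih =>
    intro k acc H
    rw [PySem.List.enumerate_cons, List.foldl_cons]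
    have h0 : (k ∈ S) ↔ pvCorruptA [] s.toList = true := by
      simpa using H 0 (by simp)
    have H' : ∀ m : Nat, m < l.length →
        ((k + 1 + m ∈ S) ↔ pvCorruptA [] ((l.getD m "").toList) = true) := by
      intro m hm
      have := H (m + 1) (by simp; omega)
      simpa [add_comm, add_left_comm, add_assoc] using this
    have hkey := pvLine s.toList
    by_cases hmem : k ∈ S
    · have hc : PySem.Set.contains S k = true := (PySem.Set.contains_iff S k).mpr hmem
      have hok : ((pvNormal s.toList).all (fun c => !pvIsCloser c)) = false := by
        have := h0.mp hmem; rw [hkey] at this; simpa using this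
      simp only [hc, if_pos, List.filter_cons, hok]
      exact ih (k + 1) acc H'
    · have hc : PySem.Set.contains S k = false := by
        rw [← Bool.not_eq_true]; intro h; exact hmem ((PySem.Set.contains_iff S k).mp h)
      have hok : ((pvNormal s.toList).all (fun c => !pvIsCloser c)) = true := by
        have hP : pvCorruptA [] s.toList = false := by
          rw [← Bool.not_eq_true]; exact fun h => hmem (h0.mpr h)
        rw [hkey] at hP; simpa using hP
      simp only [hc, Bool.false_eq_true, if_neg, not_false_iff, List.filter_cons, hok, if_pos]
      rw [ih (k + 1) (acc ++ [s]) H']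
      simp

-- ===== VERDICT (by name: the statement is the Claim_ definition above) =====
theorem get_incomplete_spec : Claim_equal_get_incomplete := by
  intro data _
  unfold Spec_get_incomplete get_incomplete get_incomplete_alt
  apply Eq.trans (pvPass2 _ data 0 [] ?_)
  · simp
  · intro m hm
    rw [pvMemBuild]
    constructor
    · rintro (h | ⟨m', hm', he, hP⟩)
      · simp [PySem.Set.empty] at h
      · have : m = m' := by omega
        subst this; exact hP
    · intro h; exact Or.inr ⟨m, hm, by ring, h⟩
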